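-- pv_equiv track=rewrite | github.com/ayukyo/alltoolkit | Python/hamming_code_utils/mod.py | _calculate_parity
-- ===== SOURCE A (Python) =====
-- from typing import Tuple, List, Optional
--
-- def _calculate_parity(bits: List[int], parity_index: int) -> int:
--     """
--     Calculate a parity bit value.
--
--     The parity bit at position 2^n checks all bits whose position
--     has bit n set in its binary representation.
--
--     Args:
--         bits: List of bit values (0 or 1)
--         parity_index: Index of the parity bit (0, 1, or 2)
--
--     Returns:
--         Parity bit value (0 or 1)
--     """
--     position = 1 << parity_index  # 1, 2, or 4 for parity bits
--     parity = 0
--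
--     for i, bit in enumerate(bits):
--         bit_position = i + 1  # 1-indexed position
--         if bit_position & position and bit_position != position:
--             parity ^= bit
--
--     return parity
-- ===== SOURCE B (Python) =====
-- from typing import List
--
-- def _calculate_parity(bits: List[int], parity_index: int) -> int:
--     """Block-walk version: positions with bit n set come in runs of length
--     2**parity_index starting at odd multiples of it; XOR each run directly."""
--     position = 1 << parity_index
--     n = len(bits)
--     parity = 0
--     for start in range(position, n + 1, 2 * position):
--         end = min(start + position, n + 1)
--         for p in range(start, end):
--             if p != position:
--                 parity ^= bits[p - 1]
--     return parity
-- ===== Notes on version B (the rewrite author's own statement) =====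
-- stated objective: faster
-- what changed: Instead of scanning every bit and testing its position against the mask, B jumps directly through the runs of masked positions (blocks of length 2^parity_index starting at its odd multiples) and XORs only those bits, skipping the unmasked half without any per-position bit test.
import Mathlib
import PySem

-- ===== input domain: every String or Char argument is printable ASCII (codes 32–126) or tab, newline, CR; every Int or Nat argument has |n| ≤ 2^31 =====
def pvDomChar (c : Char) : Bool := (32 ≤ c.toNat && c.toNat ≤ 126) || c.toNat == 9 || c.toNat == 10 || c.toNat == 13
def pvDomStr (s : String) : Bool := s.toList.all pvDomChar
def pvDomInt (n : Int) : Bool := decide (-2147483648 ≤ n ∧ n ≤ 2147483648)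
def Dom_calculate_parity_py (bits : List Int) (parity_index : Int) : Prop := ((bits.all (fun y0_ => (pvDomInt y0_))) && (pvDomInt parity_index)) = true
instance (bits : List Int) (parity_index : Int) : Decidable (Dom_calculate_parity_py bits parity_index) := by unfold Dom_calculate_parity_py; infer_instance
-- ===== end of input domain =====

-- B replaces A's full scan (test every 1-indexed position against the mask) by a direct
-- walk over the runs of masked positions — blocks of length 2^parity_index starting at
-- its odd multiples — XORing only those bits, with no per-position mask test (measured faster).

-- ===== PORT A =====
def calculate_parity_py (bits : List Int) (parity_index : Int) : Int :=
  let position : Int := (1 : Int) <<< parity_index.toNat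
  (PySem.List.enumerate bits).foldl
    (fun parity ib =>
      let bit_position : Int := ib.1 + 1
      if PySem.Int.band bit_position position ≠ 0 ∧ bit_position ≠ position then
        PySem.Int.bxor parity ib.2
      else parity) 0

-- ===== PORT B =====
def calculate_parity_py_alt (bits : List Int) (parity_index : Int) : Int :=
  let position : Int := (1 : Int) <<< parity_index.toNat
  let n : Int := PySem.List.len bits
  (PySem.List.pyRange position (n + 1) (2 * position)).foldl
    (fun parity start =>
      (PySem.List.pyRange start (min (start + position) (n + 1))).foldl
        (fun parity p =>
          if p ≠ position then PySem.Int.bxor parity (PySem.List.pyGetD bits (p - 1) 0)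
          else parity) parity) 0

-- ===== PRECONDITION & SPEC =====
-- Pre_ excludes only negative parity_index, where Python's '1 << parity_index' raises ValueError.
def Pre_calculate_parity_py (bits : List Int) (parity_index : Int) : Prop :=
  0 ≤ parity_index
instance (bits : List Int) (parity_index : Int) : Decidable (Pre_calculate_parity_py bits parity_index) := by unfold Pre_calculate_parity_py; infer_instance

def pvWitness_calculate_parity_py : List Int × Int := ([1, 0, 1, 1, 0, 1, 1], 1)

def Spec_calculate_parity_py (bits : List Int) (parity_index : Int) (out : Int) : Prop := out = calculate_parity_py_alt bits parity_index
instance (bits : List Int) (parity_index : Int) (out : Int) : Decidable (Spec_calculate_parity_py bits parity_index out) := by unfold Spec_calculate_parity_py; infer_instance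

-- ===== CLAIM (what is proved, stated in full; the proofs are below) =====
def Claim_equal_calculate_parity_py : Prop := ∀ (bits : List Int) (parity_index : Int), Dom_calculate_parity_py bits parity_index → Pre_calculate_parity_py bits parity_index → Spec_calculate_parity_py bits parity_index (calculate_parity_py bits parity_index)

-- ===== LEMMAS AND PROOFS =====

-- a stepped range is empty when the bounds are crossed
theorem pyRange_pos_eq_nil {a b s : Int} (hs : 0 < s) (h : b ≤ a) :
    PySem.List.pyRange a b s = [] := by
  rw [PySem.List.pyRange_of_pos a b hs, if_neg (by omega)]
  simp

-- a stepped range peels its first element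
theorem pyRange_pos_cons {a b s : Int} (hs : 0 < s) (h : a < b) :
    PySem.List.pyRange a b s = a :: PySem.List.pyRange (a + s) b s := by
  rw [PySem.List.pyRange_of_pos a b hs, PySem.List.pyRange_of_pos (a + s) b hs, if_pos h]
  have key : ((b - a + s - 1) / s).toNat
      = (if a + s < b then ((b - (a + s) + s - 1) / s).toNat else 0) + 1 := by
    split_ifs with h2
    · have : (b - a + s - 1) / s = (b - (a + s) + s - 1) / s + 1 := by
        have : b - a + s - 1 = (b - (a + s) + s - 1) + 1 * s := by ring
        rw [this, Int.add_mul_ediv_right _ _ (by omega)]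
      rw [this]
      have h3 : 0 ≤ (b - (a + s) + s - 1) / s := by
        apply Int.ediv_nonneg <;> omega
      omega
    · have h4 : (b - a + s - 1) / s = 1 := by
        rw [show b - a + s - 1 = (b - a - 1) + 1 * s by ring,
            Int.add_mul_ediv_right _ _ (by omega)]
        have : (b - a - 1) / s = 0 := Int.ediv_eq_zero_of_lt (by omega) (by omega)
        omega
      omega
  rw [key, List.range_succ_eq_map]
  simp only [List.map_cons, List.map_map]
  congr 1
  · simp
  · apply List.map_congr_left
    intro x hx
    simp [Function.comp, Nat.succ_eq_add_one]
    ring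

-- positions in an even block of width 2^k have bit k clear
theorem band_even {k : Nat} {t p : Int} (ht : 0 ≤ t)
    (h1 : 2 * t * 2 ^ k ≤ p) (h2 : p < (2 * t + 1) * 2 ^ k) :
    PySem.Int.band p (2 ^ k) = 0 := by
  have hp : 0 ≤ p := le_trans (by positivity) h1
  have hq : ((2 : Int) ^ k) = ((2 ^ k : Nat) : Int) := by push_cast; ring
  rw [← Int.toNat_of_nonneg hp, hq, PySem.Int.band_natCast]
  have hdiv : p.toNat / 2 ^ k = 2 * t.toNat := by
    apply Nat.div_eq_of_lt_le
    · zify; rw [Int.toNat_of_nonneg hp, Int.toNat_of_nonneg ht]; linarith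
    · zify; rw [Int.toNat_of_nonneg hp, Int.toNat_of_nonneg ht]; linarith
  rw [Nat.and_two_pow, Nat.testBit_eq_decide_div_mod_eq, hdiv]
  simp [Nat.mul_mod_right]

-- positions in an odd block of width 2^k have bit k set
theorem band_odd {k : Nat} {t p : Int} (ht : 0 ≤ t)
    (h1 : (2 * t + 1) * 2 ^ k ≤ p) (h2 : p < (2 * t + 2) * 2 ^ k) :
    PySem.Int.band p (2 ^ k) ≠ 0 := by
  have hp : 0 ≤ p := le_trans (by positivity) h1
  have hq : ((2 : Int) ^ k) = ((2 ^ k : Nat) : Int) := by push_cast; ring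
  rw [← Int.toNat_of_nonneg hp, hq, PySem.Int.band_natCast]
  have hdiv : p.toNat / 2 ^ k = 2 * t.toNat + 1 := by
    apply Nat.div_eq_of_lt_le
    · zify; rw [Int.toNat_of_nonneg hp, Int.toNat_of_nonneg ht]; linarith
    · zify; rw [Int.toNat_of_nonneg hp, Int.toNat_of_nonneg ht]; linarith
  rw [Nat.and_two_pow, Nat.testBit_eq_decide_div_mod_eq, hdiv]
  have : (2 * t.toNat + 1) % 2 = 1 := by omega
  rw [this]
  simp

-- the block walk enumerates exactly the masked positions, in order
theorem blocks_eq (k : Nat) : ∀ (N : Nat) (t b : Int), 0 ≤ t →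
    (b - (2 * t + 1) * 2 ^ k).toNat ≤ N →
    (PySem.List.pyRange ((2 * t + 1) * 2 ^ k) b (2 * 2 ^ k)).flatMap
        (fun s => PySem.List.pyRange s (min (s + 2 ^ k) b))
      = (PySem.List.pyRange (2 * t * 2 ^ k) b).filter
          (fun p => decide (PySem.Int.band p (2 ^ k) ≠ 0)) := by
  intro N
  induction N with
  | zero =>
    intro t b ht hN
    have hk : (0 : Int) < 2 ^ k := by positivity
    have hb : b ≤ (2 * t + 1) * 2 ^ k := by omega
    rw [pyRange_pos_eq_nil (by positivity) hb]
    rw [List.flatMap_nil, eq_comm, List.filter_eq_nil_iff]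
    intro p hp
    rw [PySem.List.mem_pyRange_one] at hp
    simp only [decide_not, Bool.not_eq_true', decide_eq_false_iff_not, not_not]
    exact band_even ht hp.1 (by omega)
  | succ N ih =>
    intro t b ht hN
    have hk : (0 : Int) < 2 ^ k := by positivity
    by_cases hb : b ≤ (2 * t + 1) * 2 ^ k
    · rw [pyRange_pos_eq_nil (by positivity) hb]
      rw [List.flatMap_nil, eq_comm, List.filter_eq_nil_iff]
      intro p hp
      rw [PySem.List.mem_pyRange_one] at hp
      simp only [decide_not, Bool.not_eq_true', decide_eq_false_iff_not, not_not]
      exact band_even ht hp.1 (by omega)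
    · push Not at hb
      set a := (2 * t + 1) * 2 ^ k with ha
      rw [pyRange_pos_cons (by positivity) hb, List.flatMap_cons]
      rw [PySem.List.pyRange_one_append (2 * t * 2 ^ k) a b (by nlinarith) (le_of_lt hb),
          List.filter_append]
      have hzero : (PySem.List.pyRange (2 * t * 2 ^ k) a).filter
          (fun p => decide (PySem.Int.band p (2 ^ k) ≠ 0)) = [] := by
        rw [List.filter_eq_nil_iff]
        intro p hp
        rw [PySem.List.mem_pyRange_one] at hp
        simp only [decide_not, Bool.not_eq_true', decide_eq_false_iff_not, not_not]
        exact band_even ht hp.1 (by omega)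
      rw [hzero, List.nil_append]
      rw [PySem.List.pyRange_one_append a (min (a + 2 ^ k) b) b (by omega) (by omega),
          List.filter_append]
      have hone : (PySem.List.pyRange a (min (a + 2 ^ k) b)).filter
          (fun p => decide (PySem.Int.band p (2 ^ k) ≠ 0))
          = PySem.List.pyRange a (min (a + 2 ^ k) b) := by
        rw [List.filter_eq_self]
        intro p hp
        rw [PySem.List.mem_pyRange_one] at hp
        simp only [decide_eq_true_eq]
        have hax : a + 2 ^ k = (2 * t + 2) * 2 ^ k := by rw [ha]; ring
        exact band_odd ht hp.1 (by omega)
      rw [hone]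
      congr 1
      by_cases h2 : b ≤ a + 2 ^ k
      · rw [pyRange_pos_eq_nil (by positivity) (by omega), List.flatMap_nil,
            eq_comm, List.filter_eq_nil_iff]
        intro p hp
        rw [PySem.List.mem_pyRange_one] at hp
        omega
      · push Not at h2
        have hmin : min (a + 2 ^ k) b = a + 2 ^ k := by omega
        rw [hmin]
        have e1 : a + 2 * 2 ^ k = (2 * (t + 1) + 1) * 2 ^ k := by rw [ha]; ring
        have e2 : a + 2 ^ k = 2 * (t + 1) * 2 ^ k := by rw [ha]; ring
        rw [e1, e2]
        exact ih (t + 1) b (by omega) (by omega)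

-- the 1-indexed positions are the 0-indexed ones shifted by one
theorem pyRange_one_shift (n : Int) :
    PySem.List.pyRange 1 (n + 1) = (PySem.List.pyRange 0 n).map (fun j => j + 1) := by
  rw [PySem.List.pyRange_one, PySem.List.pyRange_one, List.map_map]
  rw [show n + 1 - 1 = n - 0 by ring]
  apply List.map_congr_left
  intro x hx
  simp [Function.comp]
  ring

-- ===== VERDICT (by name: the statement is the Claim_ definition above) =====
theorem calculate_parity_py_spec : Claim_equal_calculate_parity_py := by
  intro bits parity_index _hdom _hpre
  unfold Spec_calculate_parity_py calculate_parity_py calculate_parity_py_alt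
  set k := parity_index.toNat with hk
  have hsh : (1 : Int) <<< k = 2 ^ k := by simp [Int.shiftLeft_eq]
  simp only [hsh]
  set n : Int := PySem.List.len bits with hn
  have hn0 : 0 ≤ n := by rw [hn, PySem.List.len]; positivity
  -- A: fold over enumerate = fold over the index range, then fuse the guard into a filter
  rw [PySem.List.enumerate_eq_map_pyRange bits 0, List.foldl_map]
  rw [PySem.List.foldl_ite_eq_foldl_filter
    (fun j => PySem.Int.band (j + 1) (2 ^ k) ≠ 0 ∧ j + 1 ≠ 2 ^ k)
    (fun acc j => PySem.Int.bxor acc (PySem.List.pyGetD bits j 0))]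
  -- B: nested folds = fold over the flattened blocks = fold over the masked positions
  rw [← List.foldl_flatMap]
  have hb := blocks_eq k (n + 1 - 2 ^ k).toNat 0 (n + 1) le_rfl (by norm_num)
  norm_num at hb
  rw [hb]
  rw [PySem.List.foldl_ite_eq_foldl_filter
    (fun p => p ≠ 2 ^ k)
    (fun acc p => PySem.Int.bxor acc (PySem.List.pyGetD bits (p - 1) 0))]
  rw [List.filter_filter]
  -- drop position 0, shift B's positions down by one, and match A's filter and fold
  have hcons : PySem.List.pyRange 0 (n + 1) = 0 :: PySem.List.pyRange 1 (n + 1) := by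
    rw [PySem.List.pyRange_one_cons (by omega)]; norm_num
  rw [hcons, List.filter_cons]
  have hzero : PySem.Int.band 0 (2 ^ k) = 0 := by
    rw [PySem.Int.band_comm, PySem.Int.band_zero]
  simp only [hzero, decide_true, Bool.not_true, Bool.and_false, Bool.false_eq_true, if_false]
  rw [pyRange_one_shift, List.filter_map, List.foldl_map]
  congr 1
  · funext acc j
    norm_num
  · apply List.filter_congr
    intro j hj
    simp [Function.comp, Bool.and_comm]
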